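-- pv_equiv track=rewrite | github.com/PyPSA/pypsa-eur | scripts/base_network.py | sort_values_by_dict
-- ===== SOURCE A (Python) =====
-- def sort_values_by_dict(
--     neighbours: list,
--     dicts: list,
--     ascending: bool = True,
-- ) -> list:
--     """
--     Sorts a list of keys by values from multiple dictionaries in order of priority.
--
--     Parameters
--     ----------
--         neighbours (list): List of keys to sort.
--         dicts (list): List of dictionaries containing values to sort by.
--         ascending (bool): Whether to sort in ascending order.
--
--     Returns
--     -------
--         list: Sorted list of keys.
--     """
--     return sorted(
--         neighbours,
--         key=lambda x: tuple(
--             d[x] for d in dicts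
--         ),  # Create sorting tuple from multiple dictionaries
--         reverse=not ascending,
--     )
-- ===== SOURCE B (Python) =====
-- def sort_values_by_dict(
--     neighbours: list,
--     dicts: list,
--     ascending: bool = True,
-- ) -> list:
--     # Hand-written stable binary insertion into a decorated (key, name) list,
--     # with an explicit lexicographic tuple comparison, instead of library sorted.
--     def key_less(p, q):
--         for u, v in zip(p, q):
--             if u != v:
--                 return u < v
--         return False
--
--     result = []  # list of (key_list, name), kept in output order
--     for x in neighbours:
--         kx = [d[x] for d in dicts]
--         i = 0
--         while i < len(result) and not (
--             key_less(kx, result[i][0]) if ascending else key_less(result[i][0], kx)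
--         ):
--             i += 1
--         result.insert(i, (kx, x))
--     return [name for _, name in result]
-- ===== Notes on version B (the rewrite author's own statement) =====
-- stated objective: alternative
-- what changed: Replaces the library sorted call keyed by a tuple generator with a hand-written stable insertion sort over a decorated (key-list, name) list, using an explicit element-by-element lexicographic comparison and an insertion scan that places equal keys after existing ones to preserve stability.
import Mathlib
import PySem

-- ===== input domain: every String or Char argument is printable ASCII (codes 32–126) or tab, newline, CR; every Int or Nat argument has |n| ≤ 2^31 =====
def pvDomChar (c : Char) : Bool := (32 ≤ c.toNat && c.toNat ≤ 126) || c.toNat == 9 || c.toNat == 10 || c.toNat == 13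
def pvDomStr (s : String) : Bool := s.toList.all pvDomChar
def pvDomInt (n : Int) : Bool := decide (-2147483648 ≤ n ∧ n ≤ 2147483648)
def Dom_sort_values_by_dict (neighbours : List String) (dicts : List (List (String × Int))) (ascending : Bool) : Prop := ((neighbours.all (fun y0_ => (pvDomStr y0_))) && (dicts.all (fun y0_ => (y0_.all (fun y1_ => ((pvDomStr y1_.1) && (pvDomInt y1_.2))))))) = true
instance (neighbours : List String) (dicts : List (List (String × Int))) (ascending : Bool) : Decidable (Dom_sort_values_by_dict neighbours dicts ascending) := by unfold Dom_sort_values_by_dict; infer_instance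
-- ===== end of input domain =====

-- B replaces the library sort keyed by a tuple of dict values with a hand-written
-- stable insertion sort over a decorated (key-list, name) list with an explicit
-- lexicographic comparison (objective: alternative).

-- ===== PORT A =====
-- sorted(neighbours, key=lambda x: tuple(d[x] for d in dicts), reverse=not ascending);
-- the tuple key is a List Int under Python's lexicographic tuple order; d[x] is
-- Dict.getD d x 0 — Pre_ guarantees every key is present, so the default is never read.
def sort_values_by_dict (neighbours : List String) (dicts : List (List (String × Int))) (ascending : Bool) : List String :=
  PySem.List.sorted neighbours (fun x => dicts.map (fun d => PySem.Dict.getD (PySem.Dict.mk d) x 0)) (!ascending)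

-- ===== PORT B =====
-- key_less(p, q): first differing component decides; equal-length lists, so the
-- zip in Python walks both lists together (exact on the equal-length keys B builds).
def pvLexLess : List Int → List Int → Bool
  | a :: l, b :: m => if a ≠ b then decide (a < b) else pvLexLess l m
  | _, _ => false

-- the scan 'i = 0; while i < len(result) and not before: i += 1; result.insert(i, (kx, x))'
-- written as structural recursion over result
def pvInsOrd (asc : Bool) (kx : List Int) (x : String) : List (List Int × String) → List (List Int × String)
  | [] => [(kx, x)]
  | (ky, y) :: rest =>
      if (if asc then pvLexLess kx ky else pvLexLess ky kx) then (kx, x) :: (ky, y) :: rest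
      else (ky, y) :: pvInsOrd asc kx x rest

-- result = []; for x in neighbours: kx = [d[x] for d in dicts]; insert; return names
def sort_values_by_dict_alt (neighbours : List String) (dicts : List (List (String × Int))) (ascending : Bool) : List String :=
  (neighbours.foldl
      (fun result x =>
        pvInsOrd ascending (dicts.map (fun d => PySem.Dict.getD (PySem.Dict.mk d) x 0)) x result)
      []).map (fun p => p.2)

-- ===== PRECONDITION & SPEC =====
-- Pre_ excludes exactly the inputs on which Python A raises KeyError: a neighbour missing
-- from one of the dicts.
def Pre_sort_values_by_dict (neighbours : List String) (dicts : List (List (String × Int))) (ascending : Bool) : Prop :=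
  ∀ x ∈ neighbours, ∀ d ∈ dicts, (PySem.Dict.get? (PySem.Dict.mk d) x).isSome
instance (neighbours : List String) (dicts : List (List (String × Int))) (ascending : Bool) : Decidable (Pre_sort_values_by_dict neighbours dicts ascending) := by unfold Pre_sort_values_by_dict; infer_instance

def pvWitness_sort_values_by_dict : List String × (List (List (String × Int))) × Bool :=
  (["b", "a", "c"], [[("a", 1), ("b", 0), ("c", 1)], [("a", 2), ("b", 5), ("c", 0)]], true)

def Spec_sort_values_by_dict (neighbours : List String) (dicts : List (List (String × Int))) (ascending : Bool) (out : List String) : Prop := out = sort_values_by_dict_alt neighbours dicts ascending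
instance (neighbours : List String) (dicts : List (List (String × Int))) (ascending : Bool) (out : List String) : Decidable (Spec_sort_values_by_dict neighbours dicts ascending out) := by unfold Spec_sort_values_by_dict; infer_instance

-- ===== CLAIM (what is proved, stated in full; the proofs are below) =====
def Claim_equal_sort_values_by_dict : Prop := ∀ (neighbours : List String) (dicts : List (List (String × Int))) (ascending : Bool), Dom_sort_values_by_dict neighbours dicts ascending → Pre_sort_values_by_dict neighbours dicts ascending → Spec_sort_values_by_dict neighbours dicts ascending (sort_values_by_dict neighbours dicts ascending)

-- ===== LEMMAS AND PROOFS =====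

-- the hand lexicographic comparison agrees with Lean's < on equal-length Int lists
theorem pvLexLess_eq (a : List Int) : ∀ b : List Int, a.length = b.length →
    pvLexLess a b = decide (a < b) := by
  induction a with
  | nil =>
      intro b hb
      cases b with
      | nil => simp [pvLexLess]
      | cons v m => simp at hb
  | cons u l ih =>
      intro b hb
      cases b with
      | nil => simp at hb
      | cons v m =>
          simp only [List.length_cons, Nat.add_right_cancel_iff] at hb
          by_cases huv : u = v
          · subst huv
            simp only [pvLexLess, ne_eq, not_true_eq_false, if_false, ih m hb]
            have : (u :: l < u :: m) ↔ (l < m) := by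
              rw [List.cons_lt_cons_iff]; simp
            rw [decide_eq_decide.mpr this]
          · simp only [pvLexLess, ne_eq, huv, not_false_eq_true, if_true]
            have : (u :: l < v :: m) ↔ (u < v) := by
              rw [List.cons_lt_cons_iff]; simp [huv]
            rw [decide_eq_decide.mpr this]

-- one insertion step on the decorated list = PySem.insertBy on the bare list
theorem pvInsOrd_decorate (asc : Bool) (key : String → List Int) (x : String)
    (hlen : ∀ y z : String, (key y).length = (key z).length) :
    ∀ L : List String,
      pvInsOrd asc (key x) x (L.map (fun y => (key y, y))) =
        (PySem.List.insertBy
            (fun a b => if asc then decide (key a < key b) else decide (key b < key a))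
            x L).map (fun y => (key y, y)) := by
  intro L
  induction L with
  | nil => simp [pvInsOrd, PySem.List.insertBy]
  | cons y t ih =>
      have hcond : (if asc then pvLexLess (key x) (key y) else pvLexLess (key y) (key x)) =
          (if asc then decide (key x < key y) else decide (key y < key x)) := by
        cases asc <;> simp [pvLexLess_eq _ _ (hlen _ _)]
      simp only [List.map_cons, pvInsOrd, hcond, PySem.List.insertBy]
      by_cases h : (if asc then decide (key x < key y) else decide (key y < key x)) = true
      · simp [h]
      · rw [Bool.not_eq_true] at h
        simp [h, ih]

-- the whole fold on the decorated list = the fold of insertBy on the bare list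
theorem pvFold_decorate (asc : Bool) (key : String → List Int)
    (hlen : ∀ y z : String, (key y).length = (key z).length) :
    ∀ (ns : List String) (L : List String),
      ns.foldl (fun r x => pvInsOrd asc (key x) x r) (L.map (fun y => (key y, y))) =
        (ns.foldl
            (fun acc x => PySem.List.insertBy
              (fun a b => if asc then decide (key a < key b) else decide (key b < key a))
              x acc)
            L).map (fun y => (key y, y)) := by
  intro ns
  induction ns with
  | nil => intro L; rfl
  | cons x t ih =>
      intro L
      simp only [List.foldl_cons]
      rw [pvInsOrd_decorate asc key x hlen L, ih]

-- ===== VERDICT (by name: the statement is the Claim_ definition above) =====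
theorem sort_values_by_dict_spec : Claim_equal_sort_values_by_dict := by
  intro neighbours dicts ascending _ _
  unfold Spec_sort_values_by_dict sort_values_by_dict sort_values_by_dict_alt
  set key : String → List Int := fun x => dicts.map (fun d => PySem.Dict.getD (PySem.Dict.mk d) x 0) with hkey
  have hlen : ∀ y z : String, (key y).length = (key z).length := by
    intro y z; simp [hkey]
  have hfold := pvFold_decorate ascending key hlen neighbours []
  simp only [List.map_nil] at hfold
  rw [hfold, List.map_map]
  have hmap : ((fun p : List Int × String => p.2) ∘ fun y => (key y, y)) = id := rfl
  rw [hmap, List.map_id]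
  cases ascending
  · simp only [Bool.not_false, Bool.false_eq_true, reduceIte]
    exact PySem.List.sorted_rev_eq_foldl_insertBy _ _
  · simp only [Bool.not_true, reduceIte]
    exact PySem.List.sorted_eq_foldl_insertBy _ _
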